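-- pv_equiv track=rewrite | github.com/R-A-H-U-L-Kodez/Voltaxe | services/clarity_hub_api/incident_correlator.py | determine_kill_chain_stage
-- ===== SOURCE A (Python) =====
-- from typing import List, Dict, Any, Optional
--
-- def determine_kill_chain_stage(alerts: List[Dict[str, Any]]) -> str:
--     """Map event types to MITRE ATT&CK kill chain stages"""
--     kill_chain_map = {
--         'vulnerability': 'Initial Access',
--         'malware_detected': 'Execution',
--         'suspicious_behavior': 'Persistence',
--         'privilege_escalation': 'Privilege Escalation',
--         'credential_access': 'Credential Access',
--         'lateral_movement': 'Lateral Movement',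
--         'data_exfiltration': 'Exfiltration',
--         'network_anomaly': 'Command and Control'
--     }
--
--     stages = []
--     for alert in alerts:
--         event_type = alert.get('event_type', '').lower()
--         if event_type in kill_chain_map:
--             stages.append(kill_chain_map[event_type])
--
--     if not stages:
--         return 'Unknown'
--
--     # Return the most advanced stage
--     stage_order = [
--         'Initial Access', 'Execution', 'Persistence',
--         'Privilege Escalation', 'Credential Access',
--         'Lateral Movement', 'Command and Control', 'Exfiltration'
--     ]
--
--     for stage in reversed(stage_order):
--         if stage in stages:
--             return stage
--
--     return stages[0] if stages else 'Unknown'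
-- ===== SOURCE B (Python) =====
-- def determine_kill_chain_stage(alerts):
--     """Map event types to MITRE ATT&CK kill chain stages"""
--     kill_chain_map = {
--         'vulnerability': 'Initial Access',
--         'malware_detected': 'Execution',
--         'suspicious_behavior': 'Persistence',
--         'privilege_escalation': 'Privilege Escalation',
--         'credential_access': 'Credential Access',
--         'lateral_movement': 'Lateral Movement',
--         'data_exfiltration': 'Exfiltration',
--         'network_anomaly': 'Command and Control'
--     }
--     stage_order = [
--         'Initial Access', 'Execution', 'Persistence',
--         'Privilege Escalation', 'Credential Access',
--         'Lateral Movement', 'Command and Control', 'Exfiltration'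
--     ]
--     rank = {stage: i for i, stage in enumerate(stage_order)}
--
--     best = None
--     for alert in alerts:
--         stage = kill_chain_map.get(alert.get('event_type', '').lower())
--         if stage is not None and (best is None or rank[best] < rank[stage]):
--             best = stage
--     return best if best is not None else 'Unknown'
-- ===== Notes on version B (the rewrite author's own statement) =====
-- stated objective: simpler
-- what changed: Instead of building an intermediate list of mapped stages and then scanning reversed(stage_order) with a membership test per stage, B keeps a single running argmax over a precomputed rank table in one pass and returns it directly.
import Mathlib
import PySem

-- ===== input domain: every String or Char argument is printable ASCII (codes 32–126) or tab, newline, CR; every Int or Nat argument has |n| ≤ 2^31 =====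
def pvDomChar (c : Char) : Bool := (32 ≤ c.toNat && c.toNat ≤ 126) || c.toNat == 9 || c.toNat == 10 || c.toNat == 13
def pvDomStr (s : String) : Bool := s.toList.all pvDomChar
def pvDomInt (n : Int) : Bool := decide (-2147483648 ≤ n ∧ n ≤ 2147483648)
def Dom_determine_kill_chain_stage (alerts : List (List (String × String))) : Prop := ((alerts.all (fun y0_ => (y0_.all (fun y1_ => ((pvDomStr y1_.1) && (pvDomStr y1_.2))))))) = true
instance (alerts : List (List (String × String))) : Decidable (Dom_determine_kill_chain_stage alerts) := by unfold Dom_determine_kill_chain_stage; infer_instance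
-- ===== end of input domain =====

-- B replaces A's intermediate stages list + reversed-stage_order membership scan by a single
-- running argmax over a precomputed rank table (objective: simpler).

-- ===== PORT A =====
-- shared literals (identical in both Python sources)
def pvKillChainMap : PySem.Dict String String := PySem.Dict.mk [
  ("vulnerability", "Initial Access"),
  ("malware_detected", "Execution"),
  ("suspicious_behavior", "Persistence"),
  ("privilege_escalation", "Privilege Escalation"),
  ("credential_access", "Credential Access"),
  ("lateral_movement", "Lateral Movement"),
  ("data_exfiltration", "Exfiltration"),
  ("network_anomaly", "Command and Control")]

def pvStageOrder : List String :=
  ["Initial Access", "Execution", "Persistence",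
   "Privilege Escalation", "Credential Access",
   "Lateral Movement", "Command and Control", "Exfiltration"]

-- loop body of A: event_type = alert.get('event_type','').lower(); if in map, append its stage
def pvStepA (stages : List String) (alert : List (String × String)) : List String :=
  match PySem.Dict.get? pvKillChainMap
          (PySem.Str.lower (PySem.Dict.getD (PySem.Dict.mk alert) "event_type" "")) with
  | some s => stages ++ [s]
  | none => stages

-- 'for stage in reversed(stage_order): if stage in stages: return stage'
def pvScanRev : List String → List String → Option String
  | [], _ => none
  | s :: rest, stages => if s ∈ stages then some s else pvScanRev rest stages

-- A's code after the loop (early-return chain as a match)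
def pvResultA (stages : List String) : String :=
  if stages = [] then "Unknown"
  else
    match pvScanRev pvStageOrder.reverse stages with
    | some s => s
    | none => match stages with
              | s :: _ => s
              | [] => "Unknown"

def determine_kill_chain_stage (alerts : List (List (String × String))) : String :=
  pvResultA (alerts.foldl pvStepA [])

-- ===== PORT B =====
-- rank = {stage: i for i, stage in enumerate(stage_order)}
def pvRank : PySem.Dict String Int :=
  PySem.Dict.mk ((PySem.List.enumerate pvStageOrder).map (fun p => (p.2, (p.1 : Int))))

-- loop body of B: running argmax; rank[x] is always a hit here since x is a map value
-- (ported as getD _ 0, exact on every reachable lookup)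
def pvStepB (best : Option String) (alert : List (String × String)) : Option String :=
  match PySem.Dict.get? pvKillChainMap
          (PySem.Str.lower (PySem.Dict.getD (PySem.Dict.mk alert) "event_type" "")) with
  | some stage =>
    match best with
    | none => some stage
    | some b => if PySem.Dict.getD pvRank b 0 < PySem.Dict.getD pvRank stage 0
                then some stage else some b
  | none => best

-- 'return best if best is not None else "Unknown"'
def pvResultB (best : Option String) : String :=
  match best with
  | some b => b
  | none => "Unknown"

def determine_kill_chain_stage_alt (alerts : List (List (String × String))) : String :=
  pvResultB (alerts.foldl pvStepB none)

-- ===== PRECONDITION & SPEC =====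
def Spec_determine_kill_chain_stage (alerts : List (List (String × String))) (out : String) : Prop := out = determine_kill_chain_stage_alt alerts
instance (alerts : List (List (String × String))) (out : String) : Decidable (Spec_determine_kill_chain_stage alerts out) := by unfold Spec_determine_kill_chain_stage; infer_instance

-- ===== CLAIM (what is proved, stated in full; the proofs are below) =====
def Claim_equal_determine_kill_chain_stage : Prop := ∀ (alerts : List (List (String × String))), Dom_determine_kill_chain_stage alerts → Spec_determine_kill_chain_stage alerts (determine_kill_chain_stage alerts)

-- ===== LEMMAS AND PROOFS =====

def pvRnk (s : String) : Int := PySem.Dict.getD pvRank s 0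

-- the mapped stage of one alert (the value both loop bodies branch on)
def pvKey (alert : List (String × String)) : Option String :=
  PySem.Dict.get? pvKillChainMap
    (PySem.Str.lower (PySem.Dict.getD (PySem.Dict.mk alert) "event_type" ""))

lemma pvStepA_eq (st : List String) (a : List (String × String)) :
    pvStepA st a = (match pvKey a with | some s => st ++ [s] | none => st) := rfl

lemma pvStepB_eq (best : Option String) (a : List (String × String)) :
    pvStepB best a =
      (match pvKey a with
       | some s => match best with
                   | none => some s
                   | some b => if pvRnk b < pvRnk s then some s else some b
       | none => best) := rfl

-- invariant tying A's stages list to B's running best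
def pvInv (st : List String) (best : Option String) : Prop :=
  (∀ t ∈ st, t ∈ pvStageOrder) ∧
  ((best = none ∧ st = []) ∨
   (∃ b, best = some b ∧ b ∈ st ∧ b ∈ pvStageOrder ∧ ∀ t ∈ st, pvRnk t ≤ pvRnk b))

lemma pv_map_val_mem {a : List (String × String)} {s : String} (h : pvKey a = some s) :
    s ∈ pvStageOrder := by
  simp only [pvKey, pvKillChainMap, PySem.Dict.get?_mk_cons] at h
  split_ifs at h <;> simp_all [pvStageOrder, PySem.Dict.get?]

lemma pv_inv_step (st : List String) (best : Option String) (a : List (String × String))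
    (h : pvInv st best) : pvInv (pvStepA st a) (pvStepB best a) := by
  rw [pvStepA_eq, pvStepB_eq]
  obtain ⟨hsub, hb⟩ := h
  cases hg : pvKey a with
  | none => exact ⟨hsub, hb⟩
  | some s =>
    have hs : s ∈ pvStageOrder := pv_map_val_mem hg
    have hsub' : ∀ t ∈ st ++ [s], t ∈ pvStageOrder := by
      intro t ht
      rcases List.mem_append.mp ht with h' | h'
      · exact hsub t h'
      · simp at h'; subst h'; exact hs
    rcases hb with ⟨hbn, hst⟩ | ⟨b, hbe, hbm, hbo, hmax⟩
    · subst hbn; subst hst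
      exact ⟨hsub', Or.inr ⟨s, rfl, by simp, hs,
        by intro t ht; simp at ht; subst ht; exact le_refl _⟩⟩
    · subst hbe
      show pvInv (st ++ [s]) (if pvRnk b < pvRnk s then some s else some b)
      refine ⟨hsub', Or.inr ?_⟩
      by_cases hlt : pvRnk b < pvRnk s
      · rw [if_pos hlt]
        refine ⟨s, rfl, by simp, hs, ?_⟩
        intro t ht
        rcases List.mem_append.mp ht with h' | h'
        · exact le_of_lt (lt_of_le_of_lt (hmax t h') hlt)
        · simp at h'; subst h'; exact le_refl _
      · rw [if_neg hlt]
        refine ⟨b, rfl, List.mem_append_left _ hbm, hbo, ?_⟩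
        intro t ht
        rcases List.mem_append.mp ht with h' | h'
        · exact hmax t h'
        · simp at h'; subst h'; exact le_of_not_gt hlt

lemma pv_inv_fold (alerts : List (List (String × String))) :
    ∀ st best, pvInv st best → pvInv (alerts.foldl pvStepA st) (alerts.foldl pvStepB best) := by
  induction alerts with
  | nil => intro st best h; simpa using h
  | cons a rest ih =>
    intro st best h
    simpa using ih _ _ (pv_inv_step st best a h)

lemma pv_not_mem_of_rank_lt {st : List String} {b x : String}
    (hmax : ∀ t ∈ st, pvRnk t ≤ pvRnk b) (hlt : pvRnk b < pvRnk x) : x ∉ st := by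
  intro hm
  exact absurd (hmax x hm) (not_le.mpr hlt)

lemma pv_scan_finds (st : List String) (b : String) (hbm : b ∈ st) (hbo : b ∈ pvStageOrder)
    (hmax : ∀ t ∈ st, pvRnk t ≤ pvRnk b) :
    pvScanRev pvStageOrder.reverse st = some b := by
  have hrev : pvStageOrder.reverse =
      ["Exfiltration", "Command and Control", "Lateral Movement", "Credential Access",
       "Privilege Escalation", "Persistence", "Execution", "Initial Access"] := by decide
  rw [hrev]
  fin_cases hbo
  · -- b = "Initial Access"
    have h7 : "Exfiltration" ∉ st := pv_not_mem_of_rank_lt hmax (by decide)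
    have h6 : "Command and Control" ∉ st := pv_not_mem_of_rank_lt hmax (by decide)
    have h5 : "Lateral Movement" ∉ st := pv_not_mem_of_rank_lt hmax (by decide)
    have h4 : "Credential Access" ∉ st := pv_not_mem_of_rank_lt hmax (by decide)
    have h3 : "Privilege Escalation" ∉ st := pv_not_mem_of_rank_lt hmax (by decide)
    have h2 : "Persistence" ∉ st := pv_not_mem_of_rank_lt hmax (by decide)
    have h1 : "Execution" ∉ st := pv_not_mem_of_rank_lt hmax (by decide)
    simp only [pvScanRev, if_neg h7, if_neg h6, if_neg h5, if_neg h4, if_neg h3, if_neg h2, if_neg h1, if_pos hbm]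
  · -- b = "Execution"
    have h7 : "Exfiltration" ∉ st := pv_not_mem_of_rank_lt hmax (by decide)
    have h6 : "Command and Control" ∉ st := pv_not_mem_of_rank_lt hmax (by decide)
    have h5 : "Lateral Movement" ∉ st := pv_not_mem_of_rank_lt hmax (by decide)
    have h4 : "Credential Access" ∉ st := pv_not_mem_of_rank_lt hmax (by decide)
    have h3 : "Privilege Escalation" ∉ st := pv_not_mem_of_rank_lt hmax (by decide)
    have h2 : "Persistence" ∉ st := pv_not_mem_of_rank_lt hmax (by decide)
    simp only [pvScanRev, if_neg h7, if_neg h6, if_neg h5, if_neg h4, if_neg h3, if_neg h2, if_pos hbm]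
  · -- b = "Persistence"
    have h7 : "Exfiltration" ∉ st := pv_not_mem_of_rank_lt hmax (by decide)
    have h6 : "Command and Control" ∉ st := pv_not_mem_of_rank_lt hmax (by decide)
    have h5 : "Lateral Movement" ∉ st := pv_not_mem_of_rank_lt hmax (by decide)
    have h4 : "Credential Access" ∉ st := pv_not_mem_of_rank_lt hmax (by decide)
    have h3 : "Privilege Escalation" ∉ st := pv_not_mem_of_rank_lt hmax (by decide)
    simp only [pvScanRev, if_neg h7, if_neg h6, if_neg h5, if_neg h4, if_neg h3, if_pos hbm]
  · -- b = "Privilege Escalation"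
    have h7 : "Exfiltration" ∉ st := pv_not_mem_of_rank_lt hmax (by decide)
    have h6 : "Command and Control" ∉ st := pv_not_mem_of_rank_lt hmax (by decide)
    have h5 : "Lateral Movement" ∉ st := pv_not_mem_of_rank_lt hmax (by decide)
    have h4 : "Credential Access" ∉ st := pv_not_mem_of_rank_lt hmax (by decide)
    simp only [pvScanRev, if_neg h7, if_neg h6, if_neg h5, if_neg h4, if_pos hbm]
  · -- b = "Credential Access"
    have h7 : "Exfiltration" ∉ st := pv_not_mem_of_rank_lt hmax (by decide)
    have h6 : "Command and Control" ∉ st := pv_not_mem_of_rank_lt hmax (by decide)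
    have h5 : "Lateral Movement" ∉ st := pv_not_mem_of_rank_lt hmax (by decide)
    simp only [pvScanRev, if_neg h7, if_neg h6, if_neg h5, if_pos hbm]
  · -- b = "Lateral Movement"
    have h7 : "Exfiltration" ∉ st := pv_not_mem_of_rank_lt hmax (by decide)
    have h6 : "Command and Control" ∉ st := pv_not_mem_of_rank_lt hmax (by decide)
    simp only [pvScanRev, if_neg h7, if_neg h6, if_pos hbm]
  · -- b = "Command and Control"
    have h7 : "Exfiltration" ∉ st := pv_not_mem_of_rank_lt hmax (by decide)
    simp only [pvScanRev, if_neg h7, if_pos hbm]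
  · -- b = "Exfiltration"
    simp only [pvScanRev, if_pos hbm]

lemma pv_final (st : List String) (best : Option String) (h : pvInv st best) :
    pvResultA st = pvResultB best := by
  obtain ⟨hsub, hb⟩ := h
  rcases hb with ⟨hbn, hst⟩ | ⟨b, hbe, hbm, hbo, hmax⟩
  · subst hbn; subst hst; rfl
  · subst hbe
    have hne : st ≠ [] := by intro h'; subst h'; simp at hbm
    unfold pvResultA pvResultB
    rw [if_neg hne, pv_scan_finds st b hbm hbo hmax]

-- ===== VERDICT (by name: the statement is the Claim_ definition above) =====
theorem determine_kill_chain_stage_spec : Claim_equal_determine_kill_chain_stage := by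
  intro alerts _
  unfold Spec_determine_kill_chain_stage determine_kill_chain_stage determine_kill_chain_stage_alt
  exact pv_final _ _ (pv_inv_fold alerts [] none ⟨by simp, Or.inl ⟨rfl, rfl⟩⟩)
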